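-- pv_equiv track=rewrite | github.com/WolfNiu/polite-dialogue-generation | src/model/seq2seq-LFT.py | split_triple_lst
-- ===== SOURCE A (Python) =====
-- def split_triple_lst(triple_lst, indices):
--     popped_indices = [i for (i, triple)
--                       in enumerate(triple_lst)
--                       if len(set(triple[1]).intersection(set(indices))) > 0]
--     kept_lst = [triple_lst[i] for (i, triple)
--                 in enumerate(triple_lst)
--                 if i not in popped_indices]
--     popped_lst = [triple_lst[i] for i in popped_indices]
--     assert len(kept_lst) + len(popped_lst) == len(triple_lst)
--     return (kept_lst, popped_lst)
-- ===== SOURCE B (Python) =====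
-- def split_triple_lst(triple_lst, indices):
--     index_set = set(indices)
--     kept_lst = []
--     popped_lst = []
--     for triple in triple_lst:
--         if any(x in index_set for x in triple[1]):
--             popped_lst.append(triple)
--         else:
--             kept_lst.append(triple)
--     assert len(kept_lst) + len(popped_lst) == len(triple_lst)
--     return (kept_lst, popped_lst)
-- ===== Notes on version B (the rewrite author's own statement) =====
-- stated objective: faster
-- what changed: Single pass over triple_lst appending each triple to kept or popped directly (membership tested against a precomputed set of indices), instead of building a popped-index list and then re-scanning with 'i not in popped_indices' (a linear scan per element) plus two extra indexing passes.
import Mathlib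
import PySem

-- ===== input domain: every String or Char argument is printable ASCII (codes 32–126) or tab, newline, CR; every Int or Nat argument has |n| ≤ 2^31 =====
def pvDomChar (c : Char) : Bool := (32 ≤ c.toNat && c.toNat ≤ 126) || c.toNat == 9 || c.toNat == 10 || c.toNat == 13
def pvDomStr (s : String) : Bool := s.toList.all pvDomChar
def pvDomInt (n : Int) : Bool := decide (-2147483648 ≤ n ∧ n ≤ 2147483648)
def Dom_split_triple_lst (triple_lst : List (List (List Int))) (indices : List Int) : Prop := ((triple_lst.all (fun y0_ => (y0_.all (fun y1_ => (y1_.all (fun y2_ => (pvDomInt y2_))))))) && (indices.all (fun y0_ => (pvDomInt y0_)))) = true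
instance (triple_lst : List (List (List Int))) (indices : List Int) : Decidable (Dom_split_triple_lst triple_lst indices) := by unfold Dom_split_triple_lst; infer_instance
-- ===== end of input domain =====

-- B: one pass over triple_lst against a precomputed index set instead of A's index-list
-- construction plus 'i not in popped_indices' rescans; measurably faster (fewer passes,
-- no linear membership scan). Return value only; neither program mutates its arguments.

-- ===== PORT A =====
def split_triple_lst (triple_lst : List (List (List Int))) (indices : List Int) : List (List (List Int)) × List (List (List Int)) :=
  -- popped_indices = [i for (i, triple) in enumerate(triple_lst) if len(set(triple[1]) & set(indices)) > 0]
  let popped_indices : List Int :=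
    ((PySem.List.enumerate triple_lst 0).filter
      (fun p => 0 < PySem.Set.len (PySem.Set.inter (PySem.Set.ofList (PySem.List.pyGetD p.2 1 [])) (PySem.Set.ofList indices)))).map (·.1)
  -- kept_lst = [triple_lst[i] for (i, triple) in enumerate(triple_lst) if i not in popped_indices]
  let kept_lst : List (List (List Int)) :=
    ((PySem.List.enumerate triple_lst 0).filter
      (fun p => !(popped_indices.contains p.1))).map (fun p => PySem.List.pyGetD triple_lst p.1 [])
  -- popped_lst = [triple_lst[i] for i in popped_indices]
  let popped_lst : List (List (List Int)) :=
    popped_indices.map (fun i => PySem.List.pyGetD triple_lst i [])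
  -- the assert always succeeds
  (kept_lst, popped_lst)

-- ===== PORT B =====
def split_triple_lst_alt (triple_lst : List (List (List Int))) (indices : List Int) : List (List (List Int)) × List (List (List Int)) :=
  let index_set : PySem.Set Int := PySem.Set.ofList indices
  let acc := triple_lst.foldl
    (fun acc triple =>
      if (PySem.List.pyGetD triple 1 []).any (fun x => PySem.Set.contains index_set x) then
        (acc.1, acc.2 ++ [triple])
      else
        (acc.1 ++ [triple], acc.2))
    (([], []) : List (List (List Int)) × List (List (List Int)))
  (acc.1, acc.2)

-- ===== PRECONDITION & SPEC =====
-- Pre_ excludes exactly the inputs on which Python A raises IndexError (a triple with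
-- fewer than 2 components, so triple[1] fails); Python B raises there too.
def Pre_split_triple_lst (triple_lst : List (List (List Int))) (indices : List Int) : Prop :=
  ∀ t ∈ triple_lst, 2 ≤ t.length
instance (triple_lst : List (List (List Int))) (indices : List Int) : Decidable (Pre_split_triple_lst triple_lst indices) := by unfold Pre_split_triple_lst; infer_instance
def pvWitness_split_triple_lst : List (List (List Int)) × List Int := ([[[0], [1, 2], [3]], [[0], [4], [5]]], [2])
def Spec_split_triple_lst (triple_lst : List (List (List Int))) (indices : List Int) (out : List (List (List Int)) × List (List (List Int))) : Prop := out = split_triple_lst_alt triple_lst indices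
instance (triple_lst : List (List (List Int))) (indices : List Int) (out : List (List (List Int)) × List (List (List Int))) : Decidable (Spec_split_triple_lst triple_lst indices out) := by unfold Spec_split_triple_lst; infer_instance

-- ===== CLAIM (what is proved, stated in full; the proofs are below) =====
def Claim_equal_split_triple_lst : Prop := ∀ (triple_lst : List (List (List Int))) (indices : List Int), Dom_split_triple_lst triple_lst indices → Pre_split_triple_lst triple_lst indices → Spec_split_triple_lst triple_lst indices (split_triple_lst triple_lst indices)

-- ===== LEMMAS AND PROOFS =====

-- A's membership test and B's membership test agree on every triple.
theorem pv_cond_eq (t : List Int) (indices : List Int) :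
    (decide (0 < PySem.Set.len (PySem.Set.inter (PySem.Set.ofList t) (PySem.Set.ofList indices))))
      = t.any (fun x => PySem.Set.contains (PySem.Set.ofList indices) x) := by
  simp [PySem.Set.len, PySem.Set.inter, PySem.Set.contains, List.length_pos_iff,
    List.filter_eq_nil_iff, PySem.Set.mem_ofList]
  rw [Bool.eq_iff_iff]
  simp

-- B's fold appends each element to the matching side: closed form as two filters.
theorem pv_foldl_partition {α : Type} (cond : α → Bool) (xs : List α) (k p : List α) :
    (xs.foldl (fun acc x => if cond x then (acc.1, acc.2 ++ [x]) else (acc.1 ++ [x], acc.2)) (k, p))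
      = (k ++ xs.filter (fun x => !cond x), p ++ xs.filter cond) := by
  induction xs generalizing k p with
  | nil => simp
  | cons x xs ih =>
    by_cases h : cond x = true <;> simp [h, ih]

-- mapping snd over a filter of enumerate that only looks at snd is a plain filter
theorem pv_enum_filter_map {α : Type} (cond : α → Bool) (xs : List α) (s : Int) :
    ((PySem.List.enumerate xs s).filter (fun p => cond p.2)).map (·.2) = xs.filter cond := by
  induction xs generalizing s with
  | nil => simp [PySem.List.enumerate_nil]
  | cons x xs ih =>
    by_cases h : cond x = true <;> simp [PySem.List.enumerate_cons, h, ih]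

-- enumerate's indices are distinct: equal first components force equal pairs
theorem pv_enum_fst_inj {α : Type} {xs : List α} {s : Int} {p q : Int × α}
    (hp : p ∈ PySem.List.enumerate xs s) (hq : q ∈ PySem.List.enumerate xs s)
    (h : p.1 = q.1) : p = q := by
  rw [PySem.List.mem_enumerate_iff] at hp hq
  obtain ⟨k, hk, rfl⟩ := hp
  obtain ⟨j, hj, rfl⟩ := hq
  have hkj : k = j := by simp at h; omega
  subst hkj; rfl

-- indexing the original list at an enumerate index yields the enumerated element
theorem pv_enum_pyGetD {α : Type} {xs : List α} {p : Int × α} (d : α)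
    (hp : p ∈ PySem.List.enumerate xs 0) : PySem.List.pyGetD xs p.1 d = p.2 := by
  rw [PySem.List.mem_enumerate_iff] at hp
  obtain ⟨k, hk, rfl⟩ := hp
  simp [PySem.List.pyGetD_natCast, hk]

-- membership of an enumerate index in A's popped-index list is exactly the condition
theorem pv_mem_popped {α : Type} (cond : α → Bool) (xs : List α) {p : Int × α}
    (hp : p ∈ PySem.List.enumerate xs 0) :
    ((((PySem.List.enumerate xs 0).filter (fun q => cond q.2)).map (·.1)).contains p.1) = cond p.2 := by
  rw [Bool.eq_iff_iff]
  simp only [List.contains_iff_mem, List.mem_map, List.mem_filter]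
  constructor
  · rintro ⟨q, ⟨hqm, hqc⟩, hq1⟩
    rwa [pv_enum_fst_inj hp hqm hq1.symm]
  · intro h
    exact ⟨p, ⟨hp, h⟩, rfl⟩

-- A's popped_lst is the filter of the list by the condition
theorem pv_A_popped {α : Type} (cond : α → Bool) (xs : List α) (d : α) :
    ((((PySem.List.enumerate xs 0).filter (fun q => cond q.2)).map (·.1)).map
        (fun i => PySem.List.pyGetD xs i d)) = xs.filter cond := by
  rw [List.map_map]
  have h : ∀ p ∈ (PySem.List.enumerate xs 0).filter (fun q => cond q.2),
      ((fun i => PySem.List.pyGetD xs i d) ∘ (fun x => x.1)) p = p.2 := fun p hp =>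
    pv_enum_pyGetD d (List.mem_of_mem_filter hp)
  rw [List.map_congr_left h]
  exact pv_enum_filter_map cond xs 0

-- A's kept_lst is the filter of the list by the negated condition
theorem pv_A_kept {α : Type} (cond : α → Bool) (xs : List α) (d : α) :
    (((PySem.List.enumerate xs 0).filter
        (fun p => !((((PySem.List.enumerate xs 0).filter (fun q => cond q.2)).map (·.1)).contains p.1))).map
        (fun p => PySem.List.pyGetD xs p.1 d)) = xs.filter (fun a => !cond a) := by
  rw [List.filter_congr (fun p hp => by rw [pv_mem_popped cond xs hp])]
  rw [List.map_congr_left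
    (fun p hp => pv_enum_pyGetD (p := p) d (List.mem_of_mem_filter hp))]
  exact pv_enum_filter_map (fun a => !cond a) xs 0

-- ===== VERDICT (by name: the statement is the Claim_ definition above) =====
theorem split_triple_lst_spec : Claim_equal_split_triple_lst := by
  intro triple_lst indices _ _
  unfold Spec_split_triple_lst split_triple_lst split_triple_lst_alt
  simp only [pv_cond_eq, pv_foldl_partition, List.nil_append, Prod.mk.injEq]
  exact ⟨pv_A_kept (fun t => (PySem.List.pyGetD t 1 []).any
      (fun x => (PySem.Set.ofList indices).contains x)) triple_lst [],
    pv_A_popped (fun t => (PySem.List.pyGetD t 1 []).any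
      (fun x => (PySem.Set.ofList indices).contains x)) triple_lst []⟩
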